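-- pv_equiv track=rewrite | github.com/Aniruddha-Deb/COL215P | SW-3/impl.py | get_expansion_terms
-- ===== SOURCE A (Python) =====
-- from itertools import chain, combinations
--
-- def powerset(iterable):
--     "powerset([1,2,3]) --> () (1,) (2,) (3,) (1,2) (1,3) (2,3) (1,2,3)"
--     s = list(iterable)
--     return chain.from_iterable(set(combinations(s, r)) for r in range(len(s)+1))
--
-- def get_expansion_terms(term, exp_term):
--     blank_idxs = [i for i in range(len(exp_term)) if exp_term[i] == '-']
--     t = list(exp_term)
--     terms = set()
--     for g in powerset(blank_idxs):
--         for idx in blank_idxs: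
--             if idx in g:
--                 t[idx] = '1'
--             else:
--                 t[idx] = '0'
--         terms.add(''.join(t))
--
--     terms.remove(term)
--     return terms
-- ===== SOURCE B (Python) =====
-- def get_expansion_terms(term, exp_term):
--     # Iterative DP right-to-left over the string: layers[o] holds all fillings of the
--     # processed suffix that use exactly o ones (no index powerset, no buffer mutation).
--     layers = [['']]
--     for c in reversed(exp_term):
--         if c != '-':
--             layers = [[c + t for t in lv] for lv in layers]
--         else:
--             prev = layers
--             layers = []
--             for o in range(len(prev) + 1):
--                 high = ['1' + t for t in prev[o - 1]] if o > 0 else []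
--                 low = ['0' + t for t in prev[o]] if o < len(prev) else []
--                 layers.append(high + low)
--     res = set()
--     for lv in layers:
--         res.update(lv)
--     res.remove(term)
--     return res
-- ===== Notes on version B (the rewrite author's own statement) =====
-- stated objective: alternative
-- what changed: A enumerates the powerset of blank indices and mutates a character list in place for each subset; B builds the fillings by an iterative right-to-left DP over the string whose layers are indexed by the number of ones used, never computing index sets or mutating a buffer.
import Mathlib
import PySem

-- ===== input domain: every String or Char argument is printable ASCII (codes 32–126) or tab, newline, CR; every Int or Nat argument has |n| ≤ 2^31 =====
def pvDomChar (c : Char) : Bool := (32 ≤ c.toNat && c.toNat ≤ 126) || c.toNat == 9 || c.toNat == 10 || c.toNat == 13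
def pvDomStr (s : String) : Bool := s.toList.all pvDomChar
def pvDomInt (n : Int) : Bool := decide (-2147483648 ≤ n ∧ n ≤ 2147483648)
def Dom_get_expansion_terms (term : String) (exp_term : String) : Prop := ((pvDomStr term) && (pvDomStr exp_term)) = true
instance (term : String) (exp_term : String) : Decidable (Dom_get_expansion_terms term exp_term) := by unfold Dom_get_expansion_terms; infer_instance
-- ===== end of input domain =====

-- B replaces A's powerset-of-blank-indices enumeration with direct structural recursion
-- on the string carrying a ones-budget (objective: alternative; return value only — A
-- also mutates its local list, which no caller observes).


-- ===== PORT A =====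
-- itertools.combinations(s, r) is PySem.List.combinations (lex order); each r of
-- range(len(s)+1) is ≥ 0, so r.toNat is the exact value.
def get_expansion_terms (term : String) (exp_term : String) : List String :=
  let blank_idxs : List Int :=
    (PySem.List.pyRange 0 (PySem.Str.len exp_term) 1).filter
      (fun i => PySem.Str.pyGet? exp_term i == some '-')
  let final : List Char × PySem.Set String :=
    (PySem.List.pyRange 0 ((blank_idxs.length : Int) + 1) 1).foldl
      (fun st r =>
        (PySem.Set.ofList (PySem.List.combinations blank_idxs r.toNat)).foldl
          (fun (st : List Char × PySem.Set String) g =>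
            let t' := blank_idxs.foldl
              (fun t idx =>
                if g.contains idx then PySem.List.pySetD t idx '1'
                else PySem.List.pySetD t idx '0') st.1
            (t', PySem.Set.add st.2 (String.ofList t')))
          st)
      (exp_term.toList, PySem.Set.empty)
  -- terms.remove(term) raises KeyError when term is absent (excluded by Pre_)
  (PySem.Set.remove? final.2 term).getD []

-- ===== PORT B =====
-- layers[o] = all fillings of the processed suffix using exactly o ones;
-- Python's guarded prev[o-1] / prev[o] are in range, so pyGetD's default [] is unreachable
def get_expansion_terms_alt (term : String) (exp_term : String) : List String :=
  let layers : List (List (List Char)) :=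
    exp_term.toList.reverse.foldl
      (fun layers c =>
        if c ≠ '-' then layers.map (fun lv => lv.map (fun t => c :: t))
        else
          (PySem.List.pyRange 0 ((layers.length : Int) + 1) 1).foldl
            (fun nl o =>
              nl ++ [(if o > 0 then (PySem.List.pyGetD layers (o - 1) []).map (fun t => '1' :: t) else []) ++
                     (if o < (layers.length : Int) then (PySem.List.pyGetD layers o []).map (fun t => '0' :: t) else [])])
            [])
      [[[]]]
  let res : PySem.Set String :=
    layers.foldl (fun res lv => PySem.Set.update res (lv.map String.ofList)) PySem.Set.empty
  -- res.remove(term) raises KeyError when term is absent (excluded by Pre_)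
  (PySem.Set.remove? res term).getD []

-- ===== PRECONDITION & SPEC =====
-- Pre_ excludes exactly the inputs where A raises KeyError: term must be exp_term with
-- every '-' replaced by '0' or '1' (otherwise terms.remove(term) raises).
def Pre_get_expansion_terms (term : String) (exp_term : String) : Prop :=
  term.toList.length = exp_term.toList.length ∧
  ∀ p ∈ term.toList.zip exp_term.toList,
    (p.2 = '-' → p.1 = '0' ∨ p.1 = '1') ∧ (p.2 ≠ '-' → p.1 = p.2)
instance (term : String) (exp_term : String) : Decidable (Pre_get_expansion_terms term exp_term) := by
  unfold Pre_get_expansion_terms; infer_instance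

def pvWitness_get_expansion_terms : String × String := ("0a1", "0a-")

def Spec_get_expansion_terms (term : String) (exp_term : String) (out : List String) : Prop := out = get_expansion_terms_alt term exp_term
instance (term : String) (exp_term : String) (out : List String) : Decidable (Spec_get_expansion_terms term exp_term out) := by unfold Spec_get_expansion_terms; infer_instance

-- ===== CLAIM (what is proved, stated in full; the proofs are below) =====
def Claim_equal_get_expansion_terms : Prop := ∀ (term : String) (exp_term : String), Dom_get_expansion_terms term exp_term → Pre_get_expansion_terms term exp_term → Spec_get_expansion_terms term exp_term (get_expansion_terms term exp_term)

-- ===== LEMMAS AND PROOFS =====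

-- specification of the layers: pvGen s ones = all fillings of s's blanks using
-- exactly `ones` ones, in B's layer order (and A's per-size order)
def pvGen (s : List Char) (ones : Int) : List (List Char) :=
  match s with
  | [] => if ones = 0 then [[]] else []
  | c :: rest =>
    if c ≠ '-' then (pvGen rest ones).map (fun t => c :: t)
    else
      (if ones > 0 then (pvGen rest (ones - 1)).map (fun t => '1' :: t) else []) ++
      (pvGen rest ones).map (fun t => '0' :: t)

-- positions (from offset i) of the blanks of cs
def pvBlanks (i : Int) : List Char → List Int
  | [] => []
  | c :: cs => if c = '-' then i :: pvBlanks (i+1) cs else pvBlanks (i+1) cs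

-- what A's assignment loop produces for subset g: cs with each blank at absolute
-- position p replaced by '1' if p ∈ g else '0'
def pvFill (i : Int) (g : List Int) : List Char → List Char
  | [] => []
  | c :: cs => (if c = '-' then (if g.contains i then '1' else '0') else c) :: pvFill (i+1) g cs

theorem pvBlanks_le {i x : Int} {cs : List Char} (h : x ∈ pvBlanks i cs) : i ≤ x := by
  induction cs generalizing i with
  | nil => simp [pvBlanks] at h
  | cons c cs ih =>
    simp only [pvBlanks] at h
    split at h
    · rcases List.mem_cons.1 h with rfl | h
      · exact le_refl x
      · exact le_trans (by omega) (ih h)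
    · exact le_trans (by omega) (ih h)

theorem pvBlanks_lt {i x : Int} {cs : List Char} (h : x ∈ pvBlanks i cs) :
    x < i + cs.length := by
  induction cs generalizing i with
  | nil => simp [pvBlanks] at h
  | cons c cs ih =>
    simp only [pvBlanks] at h
    split at h
    · rcases List.mem_cons.1 h with rfl | h
      · simp
      · have := ih h; simp at this ⊢; omega
    · have := ih h; simp at this ⊢; omega

theorem pvBlanks_nodup (i : Int) (cs : List Char) : (pvBlanks i cs).Nodup := by
  induction cs generalizing i with
  | nil => simp [pvBlanks]
  | cons c cs ih =>
    simp only [pvBlanks]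
    split
    · exact List.nodup_cons.2 ⟨fun h => by have := pvBlanks_le h; omega, ih (i+1)⟩
    · exact ih (i+1)

theorem pvBlanks_length (i : Int) (cs : List Char) :
    (pvBlanks i cs).length = (cs.filter (fun c => c == '-')).length := by
  induction cs generalizing i with
  | nil => simp [pvBlanks]
  | cons c cs ih =>
    simp only [pvBlanks, List.filter_cons]
    by_cases hc : c = '-' <;> simp [hc, ih]

theorem pvBlanks_mem_iff (cs : List Char) (i : Int) (j : Nat) :
    (i + (j : Int)) ∈ pvBlanks i cs ↔ cs[j]? = some '-' := by
  induction cs generalizing i j with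
  | nil => simp [pvBlanks]
  | cons c cs ih =>
    cases j with
    | zero =>
      simp only [pvBlanks, Int.natCast_zero, add_zero, List.getElem?_cons_zero]
      split
      · next hc => simp [hc]
      · next hc =>
        constructor
        · intro h; have := pvBlanks_le h; omega
        · intro h; exact absurd (Option.some.inj h) hc
    | succ j =>
      simp only [pvBlanks, List.getElem?_cons_succ]
      have hrw : i + ((j + 1 : Nat) : Int) = (i + 1) + (j : Int) := by push_cast; omega
      rw [hrw, ← ih (i+1) j]
      split
      · next hc =>
        constructor
        · intro h
          rcases List.mem_cons.1 h with h | h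
          · omega
          · exact h
        · intro h; exact List.mem_cons_of_mem _ h
      · exact Iff.rfl

theorem pvFill_length (i : Int) (g : List Int) (cs : List Char) :
    (pvFill i g cs).length = cs.length := by
  induction cs generalizing i with
  | nil => rfl
  | cons c cs ih => simp [pvFill, ih]

theorem pvFill_getElem? (cs : List Char) (i : Int) (g : List Int) (j : Nat) :
    (pvFill i g cs)[j]? =
      cs[j]?.map (fun c => if c = '-' then (if g.contains (i + (j : Int)) then '1' else '0') else c) := by
  induction cs generalizing i j with
  | nil => simp [pvFill]
  | cons c cs ih =>
    cases j with
    | zero => simp [pvFill]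
    | succ j =>
      rw [show ((j:Nat)+1 : Nat) = j+1 from rfl]
      simp only [pvFill, List.getElem?_cons_succ, ih (i+1) j]
      have hrw : (i + 1) + (j : Int) = i + ((j + 1 : Nat) : Int) := by push_cast; omega
      rw [hrw]

-- fold of pySetD over a list of in-range nonnegative indices, pointwise
theorem pvFoldSet_getElem? (v : Int → Char) (bs : List Int) :
    ∀ (t : List Char), (∀ x ∈ bs, 0 ≤ x ∧ x < (t.length : Int)) →
    ∀ j : Nat,
      (bs.foldl (fun t idx => PySem.List.pySetD t idx (v idx)) t)[j]? =
        if (j : Int) ∈ bs ∧ j < t.length then some (v j) else t[j]? := by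
  induction bs with
  | nil => intro t _ j; simp
  | cons b bs ih =>
    intro t ht j
    have hb := ht b (List.mem_cons_self)
    simp only [List.foldl_cons]
    rw [PySem.List.pySetD_of_nonneg t (v b) hb.1]
    have hlen : (t.set b.toNat (v b)).length = t.length := by simp
    rw [ih (t.set b.toNat (v b))
        (by intro x hx; have := ht x (List.mem_cons_of_mem _ hx); omega) j]
    rw [hlen]
    by_cases hj : j < t.length
    · by_cases hmem : (j : Int) ∈ bs
      · simp [hmem, hj, List.mem_cons]
      · by_cases hjb : (j : Int) = b
        · have hbn : b.toNat = j := by omega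
          rw [hbn] at *
          have : v b = v (j : Int) := by rw [hjb]
          simp [hj, hjb, List.mem_cons, this]
        · have hbn : b.toNat ≠ j := by omega
          simp only [List.getElem?_set_ne hbn]
          simp [hmem, hj, hjb, List.mem_cons]
    · have h1 : ¬ ((j : Int) ∈ bs ∧ j < t.length) := by tauto
      have h2 : ¬ ((j : Int) ∈ b :: bs ∧ j < t.length) := by tauto
      simp only [h1, h2, if_false]
      rw [List.getElem?_eq_none (le_of_not_gt hj), List.getElem?_eq_none (by rw [hlen]; exact le_of_not_gt hj)]

-- A's inner assignment loop computes pvFill, for any buffer t that agrees with es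
-- off the blanks
def pvOk (es t : List Char) : Prop :=
  t.length = es.length ∧ ∀ j : Nat, es[j]? ≠ some '-' → t[j]? = es[j]?

theorem pvAssign_eq_fill (es t : List Char) (g : List Int) (ht : pvOk es t) :
    (pvBlanks 0 es).foldl
        (fun t idx =>
          if g.contains idx then PySem.List.pySetD t idx '1'
          else PySem.List.pySetD t idx '0') t
      = pvFill 0 g es := by
  have hstep : ∀ (acc : List Char), ∀ x ∈ pvBlanks 0 es,
      (if g.contains x then PySem.List.pySetD acc x '1' else PySem.List.pySetD acc x '0')
        = PySem.List.pySetD acc x (if g.contains x then '1' else '0') := by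
    intro acc x _; split <;> rfl
  rw [PySem.List.foldl_congr_mem _ _ _ _ hstep]
  apply List.ext_getElem?
  intro j
  have hbnd : ∀ x ∈ pvBlanks 0 es, 0 ≤ x ∧ x < (t.length : Int) := by
    intro x hx
    have h1 := pvBlanks_le hx
    have h2 := pvBlanks_lt hx
    rw [ht.1]; omega
  rw [pvFoldSet_getElem? _ _ t hbnd j, pvFill_getElem?]
  by_cases hj : j < es.length
  · have hj' : j < t.length := by rw [ht.1]; exact hj
    have hes : es[j]? = some es[j] := List.getElem?_eq_getElem hj
    by_cases hc : es[j] = '-'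
    · have hmem : (j : Int) ∈ pvBlanks 0 es := by
        rw [show ((j : Nat) : Int) = 0 + (j : Int) from (zero_add _).symm]
        rw [pvBlanks_mem_iff es 0 j, hes, hc]
      simp [hmem, hj', hes, hc]
    · have hnmem : (j : Int) ∉ pvBlanks 0 es := by
        rw [show ((j : Nat) : Int) = 0 + (j : Int) from (zero_add _).symm]
        rw [pvBlanks_mem_iff es 0 j, hes]
        intro h; exact hc (Option.some.inj h)
      have htj : t[j]? = es[j]? := ht.2 j (by rw [hes]; intro h; exact hc (Option.some.inj h))
      simp [hnmem, htj, hes, hc]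
  · have hnone : es[j]? = none := List.getElem?_eq_none (le_of_not_gt hj)
    have hnmem : (j : Int) ∉ pvBlanks 0 es := by
      intro h
      have := pvBlanks_lt h
      simp at this; omega
    have htj : t[j]? = none := List.getElem?_eq_none (by rw [ht.1]; exact le_of_not_gt hj)
    simp [hnmem, hnone, htj]

theorem pvOk_fill (es : List Char) (g : List Int) : pvOk es (pvFill 0 g es) := by
  constructor
  · exact pvFill_length 0 g es
  · intro j hj
    rw [pvFill_getElem?]
    cases h : es[j]? with
    | none => rfl
    | some c =>
      rw [h] at hj
      simp only [Option.map_some]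
      have : ¬ c = '-' := fun hc => hj (by rw [hc])
      simp [this]

theorem pvCombos_nodup (bs : List Int) (hb : bs.Nodup) (r : Nat) :
    (PySem.List.combinations bs r).Nodup := by
  induction bs generalizing r with
  | nil =>
    cases r with
    | zero => simp [PySem.List.combinations_zero]
    | succ r => simp [PySem.List.combinations_nil_succ]
  | cons x xs ih =>
    cases r with
    | zero => simp [PySem.List.combinations_zero]
    | succ r =>
      rw [PySem.List.combinations_cons_succ]
      rcases List.nodup_cons.1 hb with ⟨hx, hxs⟩
      apply List.Nodup.append
      · exact (ih hxs r).map (fun a b h => by injection h)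
      · exact ih hxs (r + 1)
      · intro g hg1 hg2
        obtain ⟨g', _, rfl⟩ := List.mem_map.1 hg1
        have hsub := PySem.List.sublist_of_mem_combinations hg2
        exact hx (hsub.subset List.mem_cons_self)

theorem pvFill_cons_lt (cs : List Char) (i x : Int) (g : List Int) (hx : x < i) :
    pvFill i (x :: g) cs = pvFill i g cs := by
  induction cs generalizing i with
  | nil => rfl
  | cons c cs ih =>
    simp only [pvFill]
    have hc : (x :: g).contains i = g.contains i := by
      simp only [List.contains_cons]
      rw [show (i == x) = false by simp; omega, Bool.false_or]
    rw [hc, ih (i+1) (by omega)]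

-- A's blank-index list (a filter over range(len)) is pvBlanks 0
theorem pvFilterRange_eq (cs : List Char) :
    ∀ (pre : List Char),
      (PySem.List.pyRange ((pre.length : Int)) ((pre.length + cs.length : Nat) : Int) 1).filter
          (fun i => PySem.List.pyGet? (pre ++ cs) i == some '-')
        = pvBlanks (pre.length : Int) cs := by
  induction cs with
  | nil =>
    intro pre
    rw [PySem.List.pyRange_one_eq_nil (by simp)]
    rfl
  | cons c cs ih =>
    intro pre
    rw [PySem.List.pyRange_one_cons (by simp [List.length_cons])]
    rw [List.filter_cons]
    have hhead : (PySem.List.pyGet? (pre ++ c :: cs) (pre.length : Int) == some '-')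
        = decide (c = '-') := by
      rw [PySem.List.pyGet?_append_length]
      rw [beq_eq_decide]
      simp
    have htail := ih (pre ++ [c])
    have hl : ((pre ++ [c]).length : Int) = (pre.length : Int) + 1 := by simp
    rw [hl] at htail
    have hl2 : (((pre ++ [c]).length + cs.length : Nat) : Int)
        = ((pre.length + (c :: cs).length : Nat) : Int) := by simp; omega
    rw [hl2] at htail
    have hl3 : (pre ++ [c]) ++ cs = pre ++ c :: cs := by simp
    rw [hl3] at htail
    rw [htail, hhead]
    simp only [pvBlanks]
    by_cases hc : c = '-' <;> simp [hc]

-- the central lemma: level r of A (combinations, filled) is exactly gen es r of B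
theorem pvLevel_eq (cs : List Char) (i : Int) (r : Nat) :
    (PySem.List.combinations (pvBlanks i cs) r).map (fun g => pvFill i g cs)
      = pvGen cs (r : Int) := by
  induction cs generalizing i r with
  | nil =>
    cases r with
    | zero => simp [pvBlanks, PySem.List.combinations_zero, pvFill, pvGen]
    | succ r =>
      have : ¬ ((r : Int) + 1 = 0) := by omega
      simp [pvBlanks, PySem.List.combinations_nil_succ, pvGen, this]
  | cons c cs ih =>
    by_cases hc : c = '-'
    · subst hc
      simp only [pvBlanks, if_true]
      cases r with
      | zero =>
        simp only [PySem.List.combinations_zero, List.map_cons, List.map_nil]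
        have h0 : pvGen cs ((0 : Nat) : Int) = [pvFill (i + 1) [] cs] := by
          rw [← ih (i + 1) 0]
          simp [PySem.List.combinations_zero]
        simp only [pvGen, pvFill]
        rw [h0]
        simp
      | succ r =>
        rw [PySem.List.combinations_cons_succ, List.map_append, List.map_map]
        have hfirst :
            ((PySem.List.combinations (pvBlanks (i + 1) cs) r).map
              ((fun g => pvFill i g ('-' :: cs)) ∘ (fun c => i :: c)))
            = (pvGen cs (r : Int)).map (fun t => '1' :: t) := by
          rw [← ih (i + 1) r, List.map_map]
          apply List.map_congr_left
          intro g _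
          simp only [Function.comp_apply, pvFill]
          rw [pvFill_cons_lt cs (i + 1) i g (by omega)]
          simp
        have hsecond :
            ((PySem.List.combinations (pvBlanks (i + 1) cs) (r + 1)).map
              (fun g => pvFill i g ('-' :: cs)))
            = (pvGen cs ((r : Int) + 1)).map (fun t => '0' :: t) := by
          have hcast : ((r + 1 : Nat) : Int) = (r : Int) + 1 := by push_cast; ring
          rw [← hcast, ← ih (i + 1) (r + 1), List.map_map]
          apply List.map_congr_left
          intro g hg
          simp only [Function.comp_apply, pvFill]
          have hnot : i ∉ g := by
            intro hmem
            have hsub := PySem.List.sublist_of_mem_combinations hg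
            have hin : i ∈ pvBlanks (i + 1) cs := hsub.subset hmem
            have := pvBlanks_le hin
            omega
          simp [hnot]
        rw [hfirst, hsecond]
        have hcast : ((r + 1 : Nat) : Int) = (r : Int) + 1 := by push_cast; ring
        simp only [pvGen, hcast]
        simp
    · simp only [pvBlanks, if_neg hc]
      have : (PySem.List.combinations (pvBlanks (i + 1) cs) r).map (fun g => pvFill i g (c :: cs))
          = ((PySem.List.combinations (pvBlanks (i + 1) cs) r).map (fun g => pvFill (i + 1) g cs)).map
              (fun t => c :: t) := by
        rw [List.map_map]
        apply List.map_congr_left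
        intro g _
        simp [pvFill, hc]
      rw [this, ih (i + 1) r]
      simp [pvGen, hc]

theorem pvGen_nil_of_gt (cs : List Char) :
    ∀ r : Nat, (cs.filter (fun c => c == '-')).length < r → pvGen cs (r : Int) = [] := by
  induction cs with
  | nil =>
    intro r hr
    have h0 : ¬((r : Int) = 0) := by omega
    simp [pvGen]
    omega
  | cons c cs ih =>
    intro r hr
    by_cases hc : c = '-'
    · subst hc
      simp only [List.filter_cons, beq_self_eq_true, if_true, List.length_cons] at hr
      have h1 : pvGen cs ((r : Int) - 1) = [] := by
        have := ih (r - 1) (by omega)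
        rwa [show ((r - 1 : Nat) : Int) = (r : Int) - 1 by omega] at this
      have h2 : pvGen cs (r : Int) = [] := ih r (by omega)
      simp [pvGen, h1, h2]
    · have hr' : (cs.filter (fun c => c == '-')).length < r := by
        simpa [List.filter_cons, hc] using hr
      simp [pvGen, hc, ih r hr']

theorem pvLayers (cs : List Char) :
    cs.foldr
        (fun c layers =>
          if c ≠ '-' then layers.map (fun lv => lv.map (fun t => c :: t))
          else
            (PySem.List.pyRange 0 ((layers.length : Int) + 1) 1).foldl
              (fun nl o =>
                nl ++ [(if o > 0 then (PySem.List.pyGetD layers (o - 1) []).map (fun t => '1' :: t) else []) ++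
                       (if o < (layers.length : Int) then (PySem.List.pyGetD layers o []).map (fun t => '0' :: t) else [])])
              []) [[[]]]
      = (List.range ((cs.filter (fun c => c == '-')).length + 1)).map (fun o : Nat => pvGen cs (o : Int)) := by
  induction cs with
  | nil => simp [List.range_succ, pvGen]
  | cons c cs ih =>
    rw [List.foldr_cons, ih]
    by_cases hc : c = '-'
    · subst hc
      rw [if_neg (by simp)]
      set k := (cs.filter (fun c => c == '-')).length with hk
      set prev := (List.range (k + 1)).map (fun o : Nat => pvGen cs (o : Int)) with hprev
      have hplen : prev.length = k + 1 := by simp [hprev]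
      have hget : ∀ m : Nat, m < k + 1 → PySem.List.pyGetD prev ((m : Nat) : Int) [] = pvGen cs (m : Int) := by
        intro m hm
        rw [PySem.List.pyGetD_natCast]
        simp [hprev, List.getD_eq_getElem?_getD, List.getElem?_map, List.getElem?_range hm]
      rw [PySem.List.foldl_append_singleton_eq_map, List.nil_append, hplen,
        PySem.List.pyRange_one, List.map_map]
      have hrange : ((((k + 1 : Nat) : Int) + 1 - 0).toNat) = k + 2 := by omega
      rw [hrange]
      have hflt : ((('-' :: cs).filter (fun c => c == '-')).length + 1) = k + 2 := by
        simp [hk]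
      rw [hflt]
      apply List.map_congr_left
      intro j hj
      have hj2 : j < k + 2 := List.mem_range.1 hj
      simp only [Function.comp_apply, zero_add]
      have hgen : pvGen ('-' :: cs) ((j : Nat) : Int)
          = (if (j : Int) > 0 then (pvGen cs ((j : Int) - 1)).map (fun t => '1' :: t) else []) ++
            (pvGen cs ((j : Int))).map (fun t => '0' :: t) := by
        simp [pvGen]
      rw [hgen]
      congr 1
      · by_cases hj0 : 0 < j
        · rw [if_pos (by omega), if_pos (by omega)]
          have hcast : ((j : Int) - 1) = (((j - 1 : Nat) : Nat) : Int) := by omega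
          rw [hcast, hget (j - 1) (by omega)]
        · rw [if_neg (by omega), if_neg (by omega)]
      · by_cases hjk : j < k + 1
        · rw [if_pos (by omega), hget j hjk]
        · rw [if_neg (by omega)]
          have hnil : pvGen cs ((j : Nat) : Int) = [] := pvGen_nil_of_gt cs j (by omega)
          rw [hnil, List.map_nil]
    · rw [if_pos hc, List.map_map]
      have hflt : (('-' = c → False) → (((c :: cs).filter (fun c => c == '-')).length) = (cs.filter (fun c => c == '-')).length) := by
        intro _; simp [hc]
      rw [hflt (fun h => hc h.symm)]
      apply List.map_congr_left
      intro o _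
      simp [pvGen, hc]

theorem pvInner (es : List Char) (gs : List (List Int)) :
    ∀ (t : List Char) (terms : PySem.Set String), pvOk es t →
      ∃ t', pvOk es t' ∧
        gs.foldl
            (fun (st : List Char × PySem.Set String) g =>
              let t' := (pvBlanks 0 es).foldl
                (fun t idx =>
                  if g.contains idx then PySem.List.pySetD t idx '1'
                  else PySem.List.pySetD t idx '0') st.1
              (t', PySem.Set.add st.2 (String.ofList t'))) (t, terms)
          = (t', PySem.Set.update terms (gs.map (fun g => String.ofList (pvFill 0 g es)))) := by
  induction gs with
  | nil => intro t terms ht; exact ⟨t, ht, by simp [PySem.Set.update_nil]⟩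
  | cons g gs ih =>
    intro t terms ht
    simp only [List.foldl_cons]
    rw [show ((pvBlanks 0 es).foldl
        (fun t idx =>
          if g.contains idx then PySem.List.pySetD t idx '1'
          else PySem.List.pySetD t idx '0') (t, terms).1) = pvFill 0 g es
      from pvAssign_eq_fill es t g ht]
    obtain ⟨t', ht', heq⟩ := ih (pvFill 0 g es)
      (PySem.Set.add terms (String.ofList (pvFill 0 g es))) (pvOk_fill es g)
    refine ⟨t', ht', ?_⟩
    rw [heq, List.map_cons, PySem.Set.update_cons]

theorem pvOuter (es : List Char) (rs : List Int) :
    ∀ (t : List Char) (terms : PySem.Set String), pvOk es t →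
      (rs.foldl
          (fun st r =>
            (PySem.Set.ofList (PySem.List.combinations (pvBlanks 0 es) r.toNat)).foldl
              (fun (st : List Char × PySem.Set String) g =>
                let t' := (pvBlanks 0 es).foldl
                  (fun t idx =>
                    if g.contains idx then PySem.List.pySetD t idx '1'
                    else PySem.List.pySetD t idx '0') st.1
                (t', PySem.Set.add st.2 (String.ofList t'))) st)
          (t, terms)).2
        = rs.foldl
            (fun terms r =>
              PySem.Set.update terms
                ((PySem.List.combinations (pvBlanks 0 es) r.toNat).map
                  (fun g => String.ofList (pvFill 0 g es)))) terms := by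
  induction rs with
  | nil => intro t terms _; rfl
  | cons r rs ih =>
    intro t terms ht
    simp only [List.foldl_cons]
    obtain ⟨t', ht', heq⟩ :=
      pvInner es (PySem.Set.ofList (PySem.List.combinations (pvBlanks 0 es) r.toNat)) t terms ht
    rw [heq, PySem.Set.ofList_eq_self_of_nodup _
      (pvCombos_nodup (pvBlanks 0 es) (pvBlanks_nodup 0 es) r.toNat)]
    exact ih t' _ ht'

-- ===== VERDICT (by name: the statement is the Claim_ definition above) =====
theorem get_expansion_terms_spec : Claim_equal_get_expansion_terms := by
  unfold Claim_equal_get_expansion_terms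
  intro term exp_term _ _
  unfold Spec_get_expansion_terms get_expansion_terms get_expansion_terms_alt
  simp only [PySem.Str.len_eq, PySem.Str.pyGet?_eq, PySem.Chars.pyGet?_eq_listPyGet?]
  have hblanks :
      (PySem.List.pyRange 0 ((exp_term.toList.length : Int)) 1).filter
          (fun i => PySem.List.pyGet? exp_term.toList i == some '-')
        = pvBlanks 0 exp_term.toList := by
    simpa using pvFilterRange_eq exp_term.toList []
  rw [hblanks]
  rw [pvOuter exp_term.toList _ exp_term.toList PySem.Set.empty ⟨rfl, fun _ _ => rfl⟩]
  rw [pvBlanks_length 0 exp_term.toList]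
  congr 2
  -- B's layers loop: foldl over the reversed string is a foldr, computed by pvLayers
  have hlayers :
      (exp_term.toList.reverse.foldl
        (fun layers c =>
          if c ≠ '-' then layers.map (fun lv => lv.map (fun t => c :: t))
          else
            (PySem.List.pyRange 0 ((layers.length : Int) + 1) 1).foldl
              (fun nl o =>
                nl ++ [(if o > 0 then (PySem.List.pyGetD layers (o - 1) []).map (fun t => '1' :: t) else []) ++
                       (if o < (layers.length : Int) then (PySem.List.pyGetD layers o []).map (fun t => '0' :: t) else [])])
              [])
        [[[]]])
      = (List.range ((exp_term.toList.filter (fun c => c == '-')).length + 1)).map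
          (fun o : Nat => pvGen exp_term.toList (o : Int)) := by
    rw [List.foldl_reverse]
    exact pvLayers exp_term.toList
  rw [hlayers, List.foldl_map]
  set k := (exp_term.toList.filter (fun c => c == '-')).length with hk
  rw [PySem.List.pyRange_one]
  have hrange : (((k : Int) + 1 - 0).toNat) = k + 1 := by omega
  rw [hrange, List.foldl_map]
  apply PySem.List.foldl_congr_mem
  intro acc o _
  have htn : ((0 : Int) + (o : Int)).toNat = o := by omega
  rw [htn, ← pvLevel_eq exp_term.toList 0 o, List.map_map]
  rfl
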